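-- pv_equiv track=rewrite | github.com/zichen0116/AIsystem | backend/app/services/rehearsal_generation_service.py | merge_tts_results_into_actions
-- ===== SOURCE A (Python) =====
-- from copy import deepcopy
--
-- def merge_tts_results_into_actions(actions: list | None, tts_results: list[dict]) -> list:
--     """Return a persisted-safe action list with TTS fields merged into speech actions."""
--     updated_actions = deepcopy(actions or [])
--     speech_index = 0
--
--     for action in updated_actions:
--         if action.get("type") != "speech" or not action.get("text"):
--             continue
--         if speech_index >= len(tts_results):
--             break
--         tts_result = tts_results[speech_index]
--         speech_index += 1
--         action["temp_audio_url"] = tts_result["temp_audio_url"]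
--         action["persistent_audio_url"] = tts_result["persistent_audio_url"]
--         action["audio_status"] = tts_result["audio_status"]
--
--     return updated_actions
-- ===== SOURCE B (Python) =====
-- def merge_tts_results_into_actions(actions, tts_results):
--     """Precompute a position->tts map (indices of qualifying speech actions zipped
--     with tts_results), then rebuild the list by index lookup instead of consuming
--     results sequentially during the traversal."""
--     src = actions or []
--     speech_positions = [i for i, a in enumerate(src)
--                         if a.get("type") == "speech" and a.get("text")]
--     tts_at = dict(zip(speech_positions, tts_results))
--     merged = []
--     for i, a in enumerate(src):
--         a = dict(a)
--         if i in tts_at: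
--             tts = tts_at[i]
--             a["temp_audio_url"] = tts["temp_audio_url"]
--             a["persistent_audio_url"] = tts["persistent_audio_url"]
--             a["audio_status"] = tts["audio_status"]
--         merged.append(a)
--     return merged
-- ===== Notes on version B (the rewrite author's own statement) =====
-- stated objective: alternative
-- what changed: B replaces A's deepcopy-then-mutate loop with its sequential speech_index counter and break by a staged construction: it first collects the indices of qualifying speech actions, builds a position->tts dict by zipping those indices with tts_results, then rebuilds the output list with a per-index dict lookup instead of consuming results during the traversal.
-- outside the precondition, e.g. on merge_tts_results_into_actions([{'type': 'speech', 'text': 'hi'}], [{}]): A raises KeyError, B raises KeyError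
import Mathlib
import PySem

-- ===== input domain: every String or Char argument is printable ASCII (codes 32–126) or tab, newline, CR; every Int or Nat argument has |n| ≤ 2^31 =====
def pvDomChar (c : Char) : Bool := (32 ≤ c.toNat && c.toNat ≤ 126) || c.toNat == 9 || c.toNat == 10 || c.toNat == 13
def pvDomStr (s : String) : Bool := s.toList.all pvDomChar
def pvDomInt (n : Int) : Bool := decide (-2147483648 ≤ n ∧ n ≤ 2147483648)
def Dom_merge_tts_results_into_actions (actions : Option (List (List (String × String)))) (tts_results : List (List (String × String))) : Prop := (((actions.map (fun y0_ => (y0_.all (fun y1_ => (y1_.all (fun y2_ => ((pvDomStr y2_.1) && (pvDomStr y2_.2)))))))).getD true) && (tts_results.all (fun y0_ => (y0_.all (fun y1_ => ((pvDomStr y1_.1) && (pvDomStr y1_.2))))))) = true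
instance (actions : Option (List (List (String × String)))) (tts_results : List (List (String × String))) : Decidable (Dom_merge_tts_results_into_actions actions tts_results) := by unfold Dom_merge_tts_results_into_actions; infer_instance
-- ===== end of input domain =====

-- B precomputes a position->tts association (indices of qualifying speech actions zipped with
-- tts_results) and rebuilds the list by index lookup, instead of A's deepcopy-then-mutate loop
-- with a sequential speech_index counter and break (alternative decomposition, same cost).
-- A mutates its deepcopy only; neither argument is observably mutated. Equivalence is about the return value.


-- Shared Python-dict primitives on association lists (first-match lookup; assignment overwrites in place, new keys append)
def pvDictGet? (d : List (String × String)) (k : String) : Option String :=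
  (d.find? (fun p => p.1 == k)).map (·.2)

def pvDictSet (d : List (String × String)) (k : String) (v : String) : List (String × String) :=
  match d with
  | [] => [(k, v)]
  | p :: rest => if p.1 == k then (k, v) :: rest else p :: pvDictSet rest k v

-- action.get("type") == "speech" and truthy action.get("text")
def pvQual (a : List (String × String)) : Bool :=
  pvDictGet? a "type" == some "speech" &&
    (match pvDictGet? a "text" with | some t => !(t == "") | none => false)

-- tts_result["k"] — total form; Pre_ guarantees the key is present on every consumed entry
def pvAssign (a r : List (String × String)) : List (String × String) :=
  pvDictSet (pvDictSet (pvDictSet a "temp_audio_url" ((pvDictGet? r "temp_audio_url").getD ""))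
      "persistent_audio_url" ((pvDictGet? r "persistent_audio_url").getD ""))
    "audio_status" ((pvDictGet? r "audio_status").getD "")

-- ===== PORT A =====
-- loop over updated_actions carrying speech_index; break leaves the rest of the list untouched
def mergeLoopA (tts_results : List (List (String × String))) :
    List (List (String × String)) → Nat → List (List (String × String))
  | [], _ => []
  | a :: rest, si =>
    if !pvQual a then a :: mergeLoopA tts_results rest si
    else if tts_results.length ≤ si then a :: rest
    else pvAssign a (PySem.List.pyGetD tts_results (si : Int) []) :: mergeLoopA tts_results rest (si + 1)

def merge_tts_results_into_actions (actions : Option (List (List (String × String)))) (tts_results : List (List (String × String))) : List (List (String × String)) :=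
  mergeLoopA tts_results (actions.getD []) 0

-- ===== PORT B =====
-- enumerate(src): pairs (index, element) starting at n
def pvEnum {α : Type} (n : Nat) : List α → List (Nat × α)
  | [] => []
  | a :: r => (n, a) :: pvEnum (n + 1) r

-- first-match lookup in the position->tts map (keys are distinct positions, so dict(zip(..)) = this)
def pvLookup (z : List (Nat × List (String × String))) (i : Nat) : Option (List (String × String)) :=
  (z.find? (fun q => q.1 == i)).map (·.2)

def merge_tts_results_into_actions_alt (actions : Option (List (List (String × String)))) (tts_results : List (List (String × String))) : List (List (String × String)) :=
  let src := actions.getD []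
  let speech_positions := ((pvEnum 0 src).filter (fun p => pvQual p.2)).map (·.1)
  let tts_at := speech_positions.zip tts_results
  (pvEnum 0 src).map (fun p =>
    match pvLookup tts_at p.1 with
    | some t => pvAssign p.2 t
    | none => p.2)

-- ===== PRECONDITION & SPEC =====
-- Pre_ excludes exactly the inputs on which A raises KeyError: a tts_results entry that gets consumed
-- (one of the first `count of qualifying speech actions` entries) missing one of the three merged keys.
def Pre_merge_tts_results_into_actions (actions : Option (List (List (String × String)))) (tts_results : List (List (String × String))) : Prop :=
  ∀ r ∈ tts_results.take ((actions.getD []).countP (fun a => pvQual a)),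
    (pvDictGet? r "temp_audio_url").isSome ∧ (pvDictGet? r "persistent_audio_url").isSome ∧
      (pvDictGet? r "audio_status").isSome

instance (actions : Option (List (List (String × String)))) (tts_results : List (List (String × String))) : Decidable (Pre_merge_tts_results_into_actions actions tts_results) := by unfold Pre_merge_tts_results_into_actions; infer_instance

def pvWitness_merge_tts_results_into_actions : (Option (List (List (String × String)))) × (List (List (String × String))) :=
  (some [[("type", "speech"), ("text", "hi")], [("type", "pause")]],
   [[("temp_audio_url", "t"), ("persistent_audio_url", "p"), ("audio_status", "ok")]])

def Spec_merge_tts_results_into_actions (actions : Option (List (List (String × String)))) (tts_results : List (List (String × String))) (out : List (List (String × String))) : Prop := out = merge_tts_results_into_actions_alt actions tts_results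
instance (actions : Option (List (List (String × String)))) (tts_results : List (List (String × String))) (out : List (List (String × String))) : Decidable (Spec_merge_tts_results_into_actions actions tts_results out) := by unfold Spec_merge_tts_results_into_actions; infer_instance

-- ===== CLAIM (what is proved, stated in full; the proofs are below) =====
def Claim_equal_merge_tts_results_into_actions : Prop := ∀ (actions : Option (List (List (String × String)))) (tts_results : List (List (String × String))), Dom_merge_tts_results_into_actions actions tts_results → Pre_merge_tts_results_into_actions actions tts_results → Spec_merge_tts_results_into_actions actions tts_results (merge_tts_results_into_actions actions tts_results)

-- ===== LEMMAS AND PROOFS =====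
-- common sequential specification: recursion on the actions, rem = remaining tts results
def mergeRecB : List (List (String × String)) → List (List (String × String)) → List (List (String × String))
  | [], _ => []
  | a :: rest, rem =>
    if pvQual a then
      match rem with
      | [] => a :: mergeRecB rest []
      | t :: ts => pvAssign a t :: mergeRecB rest ts
    else a :: mergeRecB rest rem

theorem mergeRecB_nil_rem (acts : List (List (String × String))) : mergeRecB acts [] = acts := by
  induction acts with
  | nil => rfl
  | cons a rest ih => by_cases h : pvQual a = true <;> simp [mergeRecB, h, ih]

theorem loopA_eq_recB (tts : List (List (String × String))) (acts : List (List (String × String))) :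
    ∀ si : Nat, si ≤ tts.length → mergeLoopA tts acts si = mergeRecB acts (tts.drop si) := by
  induction acts with
  | nil => intro si _; rfl
  | cons a rest ih =>
    intro si hsi
    simp only [mergeLoopA, mergeRecB]
    by_cases h : pvQual a = true
    · simp only [h, Bool.not_true, Bool.false_eq_true, if_false]
      by_cases hlen : tts.length ≤ si
      · have hsi' : si = tts.length := le_antisymm hsi hlen
        simp [hsi', mergeRecB_nil_rem]
      · have hlt : si < tts.length := Nat.lt_of_not_le hlen
        have hdrop : tts.drop si = tts[si] :: tts.drop (si + 1) :=
          List.drop_eq_getElem_cons hlt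
        have hget : PySem.List.pyGetD tts (si : Int) [] = tts[si] := by
          rw [PySem.List.pyGetD_natCast]
          exact List.getD_eq_getElem _ _ hlt
        rw [if_neg hlen, hget, hdrop, ih (si + 1) hlt]; simp
    · simp [h, ih si hsi]

theorem mem_pvEnum_ge {α : Type} (l : List α) :
    ∀ n (p : Nat × α), p ∈ pvEnum n l → n ≤ p.1 := by
  induction l with
  | nil => intro n p h; cases h
  | cons a r ih =>
    intro n p h
    rcases List.mem_cons.mp h with h | h
    · subst h; simp
    · exact Nat.le_of_succ_le (ih (n + 1) p h)

theorem pvEnum_map_snd {α : Type} (l : List α) :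
    ∀ n, (pvEnum n l).map (fun p : Nat × α => p.2) = l := by
  induction l with
  | nil => intro n; rfl
  | cons a r ih => intro n; simp [pvEnum, ih (n + 1)]

-- keys of the zipped position map built from pvEnum (n+1) are all ≥ n+1
theorem zip_keys_ge (r : List (List (String × String))) (n : Nat)
    (tts : List (List (String × String)))
    (q : Nat × List (String × String))
    (hq : q ∈ (((pvEnum (n + 1) r).filter (fun p => pvQual p.2)).map (·.1)).zip tts) :
    n + 1 ≤ q.1 := by
  have h1 : q.1 ∈ ((pvEnum (n + 1) r).filter (fun p => pvQual p.2)).map (·.1) :=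
    (List.of_mem_zip hq).1
  rcases List.mem_map.mp h1 with ⟨p, hp, hpe⟩
  have := mem_pvEnum_ge r (n + 1) p (List.mem_filter.mp hp).1
  omega

theorem pvLookup_skip (k : Nat) (t : List (String × String))
    (z : List (Nat × List (String × String))) (i : Nat) (h : i ≠ k) :
    pvLookup ((k, t) :: z) i = pvLookup z i := by
  have hk : (k == i) = false := by simp [Ne.symm h]
  simp [pvLookup, List.find?, hk]

theorem pvLookup_head (k : Nat) (t : List (String × String))
    (z : List (Nat × List (String × String))) :
    pvLookup ((k, t) :: z) k = some t := by
  simp [pvLookup, List.find?]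

-- B's index-map construction equals the sequential specification, for any start offset
theorem mapB_eq_recB (acts : List (List (String × String))) :
    ∀ (n : Nat) (tts : List (List (String × String))),
      (pvEnum n acts).map (fun p =>
        match pvLookup ((((pvEnum n acts).filter (fun p => pvQual p.2)).map (·.1)).zip tts) p.1 with
        | some t => pvAssign p.2 t
        | none => p.2) = mergeRecB acts tts := by
  induction acts with
  | nil => intro n tts; rfl
  | cons a rest ih =>
    intro n tts
    by_cases h : pvQual a = true
    · cases tts with
      | nil =>
        rw [List.zip_nil_right, mergeRecB_nil_rem]
        simp only [show ∀ i, pvLookup [] i = none from fun _ => rfl]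
        exact pvEnum_map_snd _ n
      | cons t ts =>
        simp only [pvEnum, List.filter_cons, h, if_true, List.map_cons, List.zip_cons_cons,
          mergeRecB]
        congr 1
        · rw [pvLookup_head]
        · rw [← ih (n + 1) ts]
          apply List.map_congr_left
          intro p hp
          have hge := mem_pvEnum_ge rest (n + 1) p hp
          rw [pvLookup_skip n t _ p.1 (by omega)]
    · have hf : pvQual a = false := by simpa using h
      simp only [pvEnum, List.filter_cons, hf, Bool.false_eq_true, if_false, List.map_cons,
        mergeRecB]
      have hnone : pvLookup ((((pvEnum (n + 1) rest).filter (fun p => pvQual p.2)).map (·.1)).zip tts) n = none := by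
        rw [pvLookup, List.find?_eq_none.mpr]
        · rfl
        · intro q hq
          have := zip_keys_ge rest n tts q hq
          simp only [beq_iff_eq]
          omega
      congr 1
      · rw [hnone]
      · exact ih (n + 1) tts

-- ===== VERDICT (by name: the statement is the Claim_ definition above) =====
theorem merge_tts_results_into_actions_spec : Claim_equal_merge_tts_results_into_actions := by
  intro actions tts_results _ _
  unfold Spec_merge_tts_results_into_actions merge_tts_results_into_actions merge_tts_results_into_actions_alt
  rw [loopA_eq_recB tts_results _ 0 (Nat.zero_le _)]
  simpa using (mapB_eq_recB (actions.getD []) 0 tts_results).symm
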